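-- pv_equiv track=rewrite | github.com/lintyleo/hatapi | base/helper.py | _is_decimal_string
-- ===== SOURCE A (Python) =====
-- def _is_decimal_string(num_string):
--     """
--     判断是否数值组成的字符串
--     :param num_string:
--     :return:
--         如果 num_string 是空值，False
--         如果是：纯数值组成的字符串， True
--         否则：False
--     """
--     if not num_string:
--         return False
--
--     result = True
--     # 开始判断：一个个字符来检查，只要不是
--     # "0", "1", "2", "3", "4", "5", "6", "7", "8", "9"
--     # 循环 num_sting，一个个检查是不是个数字
--
--     # 如果有大于1个 的 ".", 返回 False
--     if num_string.count(".") > 1: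
--         return False
--
--     # 如果第一位是 "-", 移除第一位，继续
--
--     if len(num_string) > 0 and num_string[0] == "-":
--         num_string = num_string[1:]
--
--     # 如果有一位小数点，把小数点去掉
--     if num_string.count(".") == 1:
--         num_string = num_string.replace(".", "")
--
--     # 遍历每一位，判断是否在 0-9
--     for char in num_string:
--         # 任意一位不是 0-9，就退出循环
--         if not _is_digital(char):
--             result = False
--             break
--
--     return result
--
-- def _is_digital(char):
--     """
--     判断 char 是否是以下任意一个：
--         "0", "1", "2", "3", "4", "5", "6", "7", "8", "9"
--     :param char: 一位字符
--     :return: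
--         如果是
--         "0", "1", "2", "3", "4", "5", "6", "7", "8", "9"
--         任意一个，返回 True
--         否则，False
--     """
--     # 判断 char 是否是 "0", "1", "2", "3", "4", "5", "6", "7", "8", "9"
--     # 的任意一个
--     # if char not in ("0", "1", "2", "3", "4", "5", "6", "7", "8", "9"):
--
--     return "0" <= char <= "9"
-- ===== SOURCE B (Python) =====
-- def _is_decimal_string(num_string):
--     # Single left-to-right cursor scan: optional '-', digits, optional '.', digits, end.
--     if not num_string:
--         return False
--     s = num_string
--     n = len(s)
--     i = 1 if s[0] == '-' else 0
--     while i < n and '0' <= s[i] <= '9':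
--         i += 1
--     if i < n and s[i] == '.':
--         i += 1
--     while i < n and '0' <= s[i] <= '9':
--         i += 1
--     return i == n
-- ===== Notes on version B (the rewrite author's own statement) =====
-- stated objective: alternative
-- what changed: Replaces A's multi-pass pipeline (count the dots, slice off a leading minus, replace the dot away, then a digit loop) by a single left-to-right cursor scan that consumes an optional minus, a digit run, an optional dot and a second digit run, and checks the cursor reached the end.
import Mathlib
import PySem

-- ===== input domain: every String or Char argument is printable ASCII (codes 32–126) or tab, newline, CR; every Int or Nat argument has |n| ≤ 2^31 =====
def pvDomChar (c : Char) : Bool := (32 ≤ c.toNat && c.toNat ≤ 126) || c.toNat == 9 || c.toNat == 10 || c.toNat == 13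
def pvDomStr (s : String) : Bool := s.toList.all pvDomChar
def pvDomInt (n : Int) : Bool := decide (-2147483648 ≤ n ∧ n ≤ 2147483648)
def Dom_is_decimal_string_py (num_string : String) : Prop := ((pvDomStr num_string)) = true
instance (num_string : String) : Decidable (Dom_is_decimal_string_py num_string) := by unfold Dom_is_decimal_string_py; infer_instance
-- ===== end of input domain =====

-- B replaces A's multi-pass pipeline (count, slice, replace, digit loop) by one cursor scan; proved to return the same Bool on every string.

-- ===== PORT A =====
-- helper _is_digital: "0" <= char <= "9"
def pv_is_digital (c : Char) : Bool := decide ('0' ≤ c ∧ c ≤ '9')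

-- the for-loop with break: result stays True until a non-digit is seen
def pvLoopA : List Char → Bool
  | [] => true
  | c :: t => if !(pv_is_digital c) then false else pvLoopA t

def is_decimal_string_py (num_string : String) : Bool :=
  let l := num_string.toList
  if l.isEmpty then false
  else if 1 < PySem.Chars.count l ['.'] then false
  else
    -- if len(num_string) > 0 and num_string[0] == "-": num_string = num_string[1:]
    let l1 := if 0 < l.length && (PySem.List.pyGet? l 0 == some '-') then PySem.List.slice l (some 1) none else l
    -- if num_string.count(".") == 1: num_string = num_string.replace(".", "")
    let l2 := if PySem.Chars.count l1 ['.'] == 1 then PySem.Chars.replace l1 ['.'] [] else l1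
    pvLoopA l2

-- ===== PORT B =====
-- B's cursor i over s is represented by the remaining suffix s[i:]; each
-- `while i < n and '0' <= s[i] <= '9': i += 1` is the recursion pvScanDigits.
def pvScanDigits : List Char → List Char
  | [] => []
  | c :: t => if '0' ≤ c ∧ c ≤ '9' then pvScanDigits t else c :: t

def is_decimal_string_py_alt (num_string : String) : Bool :=
  let l := num_string.toList
  if l.isEmpty then false
  else
    let r0 := if l.head? == some '-' then l.tail else l       -- i = 1 if s[0] == '-' else 0
    let r1 := pvScanDigits r0                                  -- first digit run
    let r2 := if r1.head? == some '.' then r1.tail else r1     -- if i < n and s[i] == '.': i += 1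
    let r3 := pvScanDigits r2                                  -- second digit run
    r3.isEmpty                                                 -- i == n

-- ===== PRECONDITION & SPEC =====
def Spec_is_decimal_string_py (num_string : String) (out : Bool) : Prop := out = is_decimal_string_py_alt num_string
instance (num_string : String) (out : Bool) : Decidable (Spec_is_decimal_string_py num_string out) := by unfold Spec_is_decimal_string_py; infer_instance

-- ===== CLAIM (what is proved, stated in full; the proofs are below) =====
def Claim_equal_is_decimal_string_py : Prop := ∀ (num_string : String), Dom_is_decimal_string_py num_string → Spec_is_decimal_string_py num_string (is_decimal_string_py num_string)

-- ===== LEMMAS AND PROOFS =====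

-- str.count with a single-character needle is List.count
lemma pv_count_go_single (ch : Char) :
    ∀ (fuel : Nat) (l : List Char) (acc : Nat), l.length ≤ fuel →
      PySem.Chars.count.go [ch] fuel l acc = acc + l.count ch := by
  intro fuel
  induction fuel with
  | zero => intro l acc h; cases l with
    | nil => simp [PySem.Chars.count.go]
    | cons c t => simp at h
  | succ n ih => intro l acc h; cases l with
    | nil => simp [PySem.Chars.count.go]
    | cons c t =>
      simp only [PySem.Chars.count.go, List.isPrefixOf, List.length_cons] at *
      by_cases hc : ch = c
      · subst hc
        simp [ih t (acc + 1) (by omega), List.count_cons]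
        omega
      · simp [hc, Ne.symm hc, ih t acc (by omega), List.count_cons]

lemma pv_count_single (ch : Char) (l : List Char) :
    PySem.Chars.count l [ch] = l.count ch := by
  simp [PySem.Chars.count, pv_count_go_single ch l.length l 0 le_rfl]

-- str.replace with single-character old and empty new is a filter
lemma pv_replace_go_single (ch : Char) :
    ∀ (fuel : Nat) (l acc : List Char), l.length ≤ fuel →
      PySem.Chars.replace.go [ch] [] fuel l acc
        = acc.reverse ++ l.filter (fun c => !(ch == c)) := by
  intro fuel
  induction fuel with
  | zero => intro l acc h; cases l with
    | nil => simp [PySem.Chars.replace.go]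
    | cons c t => simp at h
  | succ n ih => intro l acc h; cases l with
    | nil => simp [PySem.Chars.replace.go]
    | cons c t =>
      simp only [PySem.Chars.replace.go, List.isPrefixOf, List.length_cons] at *
      by_cases hc : ch = c
      · subst hc
        simp [ih t acc (by omega), List.filter_cons]
      · simp [hc, Ne.symm hc, ih t (c :: acc) (by omega), List.filter_cons]

lemma pv_replace_single (ch : Char) (l : List Char) :
    PySem.Chars.replace l [ch] [] = l.filter (fun c => !(ch == c)) := by
  simp [PySem.Chars.replace, pv_replace_go_single ch l.length l [] le_rfl]

-- the break-loop is List.all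
lemma pv_loopA_eq_all (l : List Char) : pvLoopA l = l.all pv_is_digital := by
  induction l with
  | nil => rfl
  | cons c t ih => by_cases h : pv_is_digital c <;> simp [pvLoopA, h, ih]

-- digits are not '.'
lemma pv_dig_ne_dot {c : Char} (h : '0' ≤ c ∧ c ≤ '9') : c ≠ '.' := by
  rintro rfl; revert h; decide

-- scan consumes the whole list iff it is all digits
lemma pv_scan_isEmpty (t : List Char) : (pvScanDigits t).isEmpty = t.all pv_is_digital := by
  induction t with
  | nil => rfl
  | cons c s ih =>
    by_cases h : '0' ≤ c ∧ c ≤ '9'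
    · have : pv_is_digital c = true := by simp [pv_is_digital, h]
      simp [pvScanDigits, h, this, ih]
    · have : pv_is_digital c = false := by simp [pv_is_digital, h]
      simp [pvScanDigits, h, this]

-- core: B's scan on m equals A's count/filter/all pipeline on m
lemma pv_core (m : List Char) :
    (pvScanDigits (if (pvScanDigits m).head? = some '.' then (pvScanDigits m).tail
                   else pvScanDigits m)).isEmpty
      = (!decide (1 < m.count '.') &&
         (if m.count '.' = 1 then m.filter (fun c => !('.' == c)) else m).all pv_is_digital) := by
  induction m with
  | nil => simp [pvScanDigits]
  | cons c t ih =>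
    by_cases hd : '0' ≤ c ∧ c ≤ '9'
    · -- digit head: both sides reduce to the tail
      have hne : c ≠ '.' := pv_dig_ne_dot hd
      have hcount : (c :: t).count '.' = t.count '.' := by
        simp [List.count_cons, hne]
      have hdig : pv_is_digital c = true := by simp [pv_is_digital, hd]
      have hscan : pvScanDigits (c :: t) = pvScanDigits t := by simp [pvScanDigits, hd]
      rw [hscan, hcount, ih]
      by_cases h1 : 1 < t.count '.'
      · simp [h1]
      · by_cases h2 : t.count '.' = 1 <;>
          simp [h1, h2, List.filter_cons, Ne.symm hne, hdig]
    · by_cases hc : c = '.'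
      · subst hc
        -- scan stops at '.', consumes it; the rest must be all digits
        have hscan : pvScanDigits ('.' :: t) = '.' :: t := by
          simp [pvScanDigits]
        rw [hscan]
        simp only [List.head?_cons, beq_self_eq_true, if_pos, List.tail_cons, List.count_cons]
        by_cases h0 : t.count '.' = 0
        · have hfil : t.filter (fun c => !('.' == c)) = t := by
            rw [List.filter_eq_self]
            intro a ha
            have : a ≠ '.' := fun h => by
              subst h; exact absurd h0 (by simp [List.count_eq_zero, ha])
            simp [Ne.symm this]
          simp [h0, List.filter_cons, hfil, pv_scan_isEmpty]
        · have h1 : 1 < t.count '.' + 1 := by omega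
          have hdot : '.' ∈ t := by
            rcases List.count_pos_iff.mp (Nat.pos_of_ne_zero h0) with h
            exact h
          have hall : t.all pv_is_digital = false := by
            rw [List.all_eq_false]
            exact ⟨'.', hdot, by decide⟩
          simp [h1, pv_scan_isEmpty, hall]
      · -- non-digit, non-dot head: both sides false
        have hscan : pvScanDigits (c :: t) = c :: t := by simp [pvScanDigits, hd]
        have hdig : pv_is_digital c = false := by simp [pv_is_digital, hd]
        rw [hscan]
        simp [List.count_cons, hc, List.filter_cons, Ne.symm hc, hdig, pvScanDigits, hd]
        intro _
        split <;> exact ⟨c, by simp, hdig⟩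

-- ===== VERDICT (by name: the statement is the Claim_ definition above) =====
theorem is_decimal_string_py_spec : Claim_equal_is_decimal_string_py := by
  intro s _
  unfold Spec_is_decimal_string_py is_decimal_string_py is_decimal_string_py_alt
  cases h : s.toList with
  | nil => simp
  | cons c t =>
    simp only [List.isEmpty_cons, Bool.false_eq_true, if_false,
      pv_count_single, pv_replace_single, pv_loopA_eq_all,
      PySem.List.slice_from_one, PySem.List.pyGet?, PySem.List.pyIdx?,
      List.head?_cons, List.length_cons]
    by_cases hm : c = '-'
    · subst hm
      simp [List.count_cons]
      exact (pv_core t).symm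
    · simp [hm]
      exact (pv_core (c :: t)).symm
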